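-- pv_equiv track=rewrite | github.com/LeisureGong/RLcourse | DataMinig/Assignment1/apriori_dummy.py | candidate_frequency
-- ===== SOURCE A (Python) =====
-- def candidate_frequency(data, candidate_k):
--     freq_map = {}
--     for item_set in candidate_k:
--         can_set = set(item_set)
--         can_str = ','.join(item_set)
--         freq_map[can_str] = 0
--         for init_tup in data:
--             if can_set.issubset(init_tup):
--                 freq_map[can_str] += 1
--     return freq_map
-- ===== SOURCE B (Python) =====
-- def candidate_frequency(data, candidate_k):
--     # Inverted index: item -> list of indices of transactions containing it,
--     # then each candidate's count is the size of the intersection of its items' tid-lists.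
--     tids = {}
--     for i, tup in enumerate(data):
--         for item in dict.fromkeys(tup):
--             tids.setdefault(item, []).append(i)
--     freq_map = {}
--     for item_set in candidate_k:
--         acc = list(range(len(data)))
--         for it in dict.fromkeys(item_set):
--             hits = set(tids.get(it, []))
--             acc = [i for i in acc if i in hits]
--         freq_map[','.join(item_set)] = len(acc)
--     return freq_map
-- ===== Notes on version B (the rewrite author's own statement) =====
-- stated objective: alternative
-- what changed: B builds an inverted index item -> list of transaction indices in one pass over the data, then counts each candidate as the size of the intersection of its items' tid-lists (starting from all indices), instead of A's per-candidate subset scan over the whole data.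
import Mathlib
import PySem

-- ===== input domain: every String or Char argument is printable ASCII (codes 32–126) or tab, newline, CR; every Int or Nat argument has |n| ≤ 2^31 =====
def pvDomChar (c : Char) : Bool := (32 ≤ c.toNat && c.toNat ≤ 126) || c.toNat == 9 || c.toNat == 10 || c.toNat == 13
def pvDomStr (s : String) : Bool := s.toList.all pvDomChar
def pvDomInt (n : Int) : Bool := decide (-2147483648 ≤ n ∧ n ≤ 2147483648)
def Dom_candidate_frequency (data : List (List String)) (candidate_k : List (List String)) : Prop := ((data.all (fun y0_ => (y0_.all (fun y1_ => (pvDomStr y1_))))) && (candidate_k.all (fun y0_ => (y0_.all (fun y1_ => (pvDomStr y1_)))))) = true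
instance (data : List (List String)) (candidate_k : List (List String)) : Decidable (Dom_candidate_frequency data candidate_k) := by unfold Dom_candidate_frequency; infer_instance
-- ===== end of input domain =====

-- B replaces A's per-candidate rescans of the data by an inverted index
-- (item -> list of transaction indices); each candidate's count is the size of
-- the intersection of its items' tid-lists. Alternative data structure, not claimed faster.

-- ===== PORT A =====
def candidate_frequency (data : List (List String)) (candidate_k : List (List String)) : List (String × Int) :=
  (candidate_k.foldl
      (fun freq_map item_set =>
        let can_set : PySem.Set String := PySem.Set.ofList item_set
        let can_str : String := PySem.Str.join "," item_set
        let freq_map := freq_map.insert can_str 0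
        data.foldl
          (fun fm init_tup =>
            if PySem.Set.issubset can_set init_tup then
              fm.insert can_str (fm.getD can_str 0 + 1)   -- freq_map[can_str] += 1
            else fm)
          freq_map)
      (PySem.Dict.empty : PySem.Dict String Int)).items

-- ===== PORT B =====
def candidate_frequency_alt (data : List (List String)) (candidate_k : List (List String)) : List (String × Int) :=
  -- tids: item -> list of indices of transactions containing it
  let tids : PySem.Dict String (List Int) :=
    (PySem.List.enumerate data).foldl
      (fun d p =>
        (PySem.List.dedup p.2).foldl                 -- for item in dict.fromkeys(tup)
          (fun d item => d.modify item [] (fun l => l ++ [p.1]))  -- tids.setdefault(item, []).append(i)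
          d)
      PySem.Dict.empty
  (candidate_k.foldl
      (fun fm item_set =>
        let acc : List Int :=
          (PySem.List.dedup item_set).foldl          -- for it in dict.fromkeys(item_set)
            (fun acc it => acc.filter (fun i => decide (i ∈ tids.getD it [])))
            (PySem.List.pyRange 0 (data.length : Int) 1)   -- list(range(len(data)))
        fm.insert (PySem.Str.join "," item_set) (acc.length : Int))
      (PySem.Dict.empty : PySem.Dict String Int)).items

-- ===== PRECONDITION & SPEC =====
def Spec_candidate_frequency (data : List (List String)) (candidate_k : List (List String)) (out : List (String × Int)) : Prop := out = candidate_frequency_alt data candidate_k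
instance (data : List (List String)) (candidate_k : List (List String)) (out : List (String × Int)) : Decidable (Spec_candidate_frequency data candidate_k out) := by unfold Spec_candidate_frequency; infer_instance

-- ===== CLAIM (what is proved, stated in full; the proofs are below) =====
def Claim_equal_candidate_frequency : Prop := ∀ (data : List (List String)) (candidate_k : List (List String)), Dom_candidate_frequency data candidate_k → Spec_candidate_frequency data candidate_k (candidate_frequency data candidate_k)

-- ===== LEMMAS AND PROOFS =====

-- Overwriting the same key twice collapses to the second write.
theorem dict_insert_insert {κ ν : Type} [BEq κ] [LawfulBEq κ] [DecidableEq κ] (d : PySem.Dict κ ν) (k : κ) (v w : ν) :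
    (d.insert k v).insert k w = d.insert k w := by
  exact PySem.Dict.insert_insert_self d k v w

-- A's inner loop over the data just bumps the one key it targets.
theorem A_inner (p : List String → Bool) (k : String) :
    ∀ (data : List (List String)) (d : PySem.Dict String Int) (v : Int),
      data.foldl (fun fm tup => if p tup then fm.insert k (fm.getD k 0 + 1) else fm) (d.insert k v)
        = d.insert k (v + ((data.countP p : Nat) : Int))
  | [], d, v => by simp
  | t :: ts, d, v => by
    simp only [List.foldl_cons]
    by_cases hp : p t = true
    · rw [if_pos hp, PySem.Dict.getD_insert_self, dict_insert_insert,
          A_inner p k ts d (v + 1)]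
      congr 1
      simp [hp]
      omega
    · rw [if_neg hp, A_inner p k ts d v]
      congr 1
      simp [hp]
  termination_by data => data.length

-- A's outer fold with each inner loop replaced by its closed form.
theorem A_fold (data : List (List String)) :
    ∀ (ck : List (List String)) (d : PySem.Dict String Int),
      ck.foldl
          (fun freq_map item_set =>
            let can_set : PySem.Set String := PySem.Set.ofList item_set
            let can_str : String := PySem.Str.join "," item_set
            let freq_map := freq_map.insert can_str 0
            data.foldl
              (fun fm init_tup =>
                if PySem.Set.issubset can_set init_tup then
                  fm.insert can_str (fm.getD can_str 0 + 1)
                else fm)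
              freq_map)
          d
        = ck.foldl
            (fun d item_set =>
              d.insert (PySem.Str.join "," item_set)
                ((data.countP (fun tup => PySem.Set.issubset (PySem.Set.ofList item_set) tup) : Nat) : Int))
            d
  | [], _ => rfl
  | s :: ck, d => by
    simp only [List.foldl_cons]
    rw [A_fold data ck]
    congr 1
    simpa using A_inner (fun tup => PySem.Set.issubset (PySem.Set.ofList s) tup)
      (PySem.Str.join "," s) data d 0
  termination_by ck => ck.length

-- A computed as one insert per candidate of the closed-form count.
theorem A_eq (data candidate_k : List (List String)) :
    candidate_frequency data candidate_k
      = (candidate_k.foldl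
          (fun d item_set =>
            d.insert (PySem.Str.join "," item_set)
              ((data.countP (fun tup => PySem.Set.issubset (PySem.Set.ofList item_set) tup) : Nat) : Int))
          (PySem.Dict.empty : PySem.Dict String Int)).items := by
  unfold candidate_frequency
  rw [A_fold]

-- filter of a nodup list by equality with c
theorem filter_beq_of_nodup (l : List String) (hnd : l.Nodup) (c : String) :
    l.filter (fun x => x == c) = if c ∈ l then [c] else [] := by
  induction l with
  | nil => simp
  | cons a l ih =>
    rcases List.nodup_cons.mp hnd with ⟨ha, hl⟩
    by_cases hac : a = c
    · subst hac
      simp [ih hl, ha]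
    · simp only [List.filter_cons]
      rw [ih hl]
      by_cases hc : c ∈ l <;> simp [hac, hc, Ne.symm hac]

-- the inverted-index build: each key's value is the list of first components of
-- the processed pairs whose transaction contains it.
theorem tids_getD :
    ∀ (l : List (Int × List String)) (d : PySem.Dict String (List Int)) (c : String),
      (l.foldl
          (fun d p =>
            (PySem.List.dedup p.2).foldl
              (fun d item => d.modify item [] (fun v => v ++ [p.1])) d)
          d).getD c []
        = d.getD c [] ++ (l.filter (fun p => decide (c ∈ p.2))).map (·.1)
  | [], d, c => by simp
  | p :: l, d, c => by
    simp only [List.foldl_cons]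
    rw [tids_getD l _ c]
    have hin :
        ((PySem.List.dedup p.2).foldl
            (fun d item => d.modify item [] (fun v => v ++ [p.1])) d).getD c []
          = d.getD c [] ++ (if c ∈ p.2 then [p.1] else []) := by
      have h1 := PySem.Dict.getD_foldl_modify_append
        ((PySem.List.dedup p.2).map (fun item => (item, p.1))) d c
      rw [List.foldl_map] at h1
      rw [h1, List.filter_map, List.map_map]
      have : (PySem.List.dedup p.2).filter
          ((fun q : String × Int => q.1 == c) ∘ fun item => (item, p.1))
            = (PySem.List.dedup p.2).filter (fun x => x == c) := by
        apply List.filter_congr; intro x _; rfl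
      rw [this, filter_beq_of_nodup _ (PySem.List.nodup_dedup _) c]
      by_cases hc : c ∈ p.2 <;> simp [hc]
    rw [hin, List.filter_cons]
    by_cases hc : c ∈ p.2 <;> simp [hc]
  termination_by l => l.length

-- folding intersection-filters = one filter by the conjunction
theorem foldl_filter (q : String → Int → Bool) :
    ∀ (its : List String) (acc : List Int),
      its.foldl (fun acc it => acc.filter (fun i => q it i)) acc
        = acc.filter (fun i => its.all (fun it => q it i))
  | [], acc => by simp
  | it :: its, acc => by
    simp only [List.foldl_cons]
    rw [foldl_filter q its, List.filter_filter]
    apply List.filter_congr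
    intro x _
    simp [Bool.and_comm]
  termination_by its => its.length

-- per-candidate: the intersection count equals A's subset count
theorem B_count (data : List (List String)) (item_set : List String) :
    (((PySem.List.dedup item_set).foldl
        (fun acc it =>
          acc.filter (fun i => decide (i ∈
            ((PySem.List.enumerate data).foldl
                (fun d p =>
                  (PySem.List.dedup p.2).foldl
                    (fun d item => d.modify item [] (fun v => v ++ [p.1])) d)
                PySem.Dict.empty).getD it [])))
        (PySem.List.pyRange 0 (data.length : Int) 1)).length : Int)
      = ((data.countP (fun tup => PySem.Set.issubset (PySem.Set.ofList item_set) tup) : Nat) : Int) := by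
  congr 1
  rw [foldl_filter]
  have hrange : PySem.List.pyRange 0 (data.length : Int) 1
      = (PySem.List.enumerate data).map (·.1) := by
    rw [PySem.List.map_fst_enumerate]
    norm_num
  rw [hrange, List.filter_map, List.length_map, ← List.countP_eq_length_filter]
  have hsnd : data.countP (fun tup => PySem.Set.issubset (PySem.Set.ofList item_set) tup)
      = (PySem.List.enumerate data).countP
          (fun p => PySem.Set.issubset (PySem.Set.ofList item_set) p.2) := by
    conv_lhs => rw [← PySem.List.map_snd_enumerate data 0]
    rw [List.countP_map]
    rfl
  rw [hsnd]
  apply List.countP_congr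
  intro p hp
  rcases (PySem.List.mem_enumerate_iff _ _ _).mp hp with ⟨k, hk, rfl⟩
  simp only [Function.comp]
  rw [show ((0 : Int) + (k : Int)) = (k : Int) by ring]
  constructor
  · intro h
    rw [PySem.Set.issubset_iff]
    intro x hx
    have hx' : x ∈ PySem.List.dedup item_set := by
      simpa [PySem.List.mem_dedup] using (PySem.Set.mem_ofList _ _).mp hx
    have hmem := of_decide_eq_true (List.all_eq_true.mp h x hx')
    rw [tids_getD] at hmem
    simp only [PySem.Dict.getD_empty, List.nil_append, List.mem_map,
      List.mem_filter] at hmem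
    rcases hmem with ⟨q, ⟨hq, hq2⟩, hq1⟩
    rcases (PySem.List.mem_enumerate_iff _ _ _).mp hq with ⟨k', hk', rfl⟩
    simp only [] at hq1
    have : k' = k := by
      have : ((0:Int) + (k':Int)) = (k:Int) := hq1
      omega
    subst this
    exact of_decide_eq_true hq2
  · intro h
    rw [List.all_eq_true]
    intro x hx
    apply decide_eq_true
    rw [tids_getD]
    simp only [PySem.Dict.getD_empty, List.nil_append, List.mem_map, List.mem_filter]
    refine ⟨((k : Int), data[k]), ⟨?_, ?_⟩, by ring⟩
    · rw [PySem.List.mem_enumerate_iff]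
      exact ⟨k, hk, by norm_num⟩
    · apply decide_eq_true
      have hx' : x ∈ PySem.Set.ofList item_set := by
        rw [PySem.Set.mem_ofList]
        simpa [PySem.List.mem_dedup] using hx
      exact ((PySem.Set.issubset_iff _ _).mp h) x hx'

-- B computed as the same fold of closed-form inserts.
theorem B_eq (data candidate_k : List (List String)) :
    candidate_frequency_alt data candidate_k
      = (candidate_k.foldl
          (fun d item_set =>
            d.insert (PySem.Str.join "," item_set)
              ((data.countP (fun tup => PySem.Set.issubset (PySem.Set.ofList item_set) tup) : Nat) : Int))
          (PySem.Dict.empty : PySem.Dict String Int)).items := by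
  unfold candidate_frequency_alt
  simp only []
  congr 2
  funext fm item_set
  congr 1
  exact B_count data item_set

-- ===== VERDICT (by name: the statement is the Claim_ definition above) =====
theorem candidate_frequency_spec : Claim_equal_candidate_frequency := by
  intro data candidate_k _
  unfold Spec_candidate_frequency
  rw [A_eq, B_eq]
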